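/- GENERATED by farm/mkstatement.py from design/units.tsv (unit `init_blocksize`) and the Specs of Vorbis/Spec/*.lean — do not edit.
   THE STATEMENT of the proof unit `init_blocksize`: the function `init_blocksize` (117 instructions) satisfies its contract,
   given the contracts of its callees. What the names mean: Vorbis/Spec/Basic.lean. The theorem to prove:
   `theorem init_blocksize_ok : Vorbis.Spec.init_blocksize.Statement`. -/
import Vorbis.Spec.Alloc
import Vorbis.Spec.Leaves
import Vorbis.Spec.Mdct
import Vorbis.Spec.MdctTop
namespace Vorbis.Spec.init_blocksize
open X86 X86.User Asan

/-- The statement of unit `init_blocksize`. -/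
def Statement : Prop :=
  ∀ (Lay : Layout) (_hLay : Lay.hi = 0x1000000) (μ : Microarch) (_hμ : UserX.MicroOK μ) (u₀ : State)
    (_hcode : HasCodeNat Lay u₀ Vorbis.L.init_blocksize.entry Vorbis.Code.code_init_blocksize.nat Vorbis.L.init_blocksize.size)
    (_h_setup_malloc : ∀ (others : List Obj) (frames : List (Nat × FrameLayout)) (A : Arena), Calls Lay μ Vorbis.WayInv (Vorbis.conv u₀) Vorbis.L.setup_malloc.entry (Vorbis.Spec.setup_malloc.spec others frames A))
    (_h_asan_store8_noabort : Asan.SmallCheck Lay μ Vorbis.WayInv (Vorbis.CodeOK u₀) [.rax, .rcx, .rdx] 8 Vorbis.L.__asan_store8_noabort.entry)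
    (_h_asan_load8_noabort : Asan.SmallCheck Lay μ Vorbis.WayInv (Vorbis.CodeOK u₀) [.rax, .rcx, .rdx] 8 Vorbis.L.__asan_load8_noabort.entry)
    (_h_compute_twiddle_factors : ∀ (others : List Obj) (frames : List (Nat × FrameLayout)), Calls Lay μ Vorbis.WayInv (Vorbis.conv u₀) Vorbis.L.compute_twiddle_factors.entry (Vorbis.Spec.compute_twiddle_factors.spec others frames))
    (_h_compute_window : ∀ (others : List Obj) (frames : List (Nat × FrameLayout)), Calls Lay μ Vorbis.WayInv (Vorbis.conv u₀) Vorbis.L.compute_window.entry (Vorbis.Spec.compute_window.spec others frames))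
    (_h_compute_bitreverse : ∀ (others : List Obj) (frames : List (Nat × FrameLayout)) (k : Nat), Calls Lay μ Vorbis.WayInv (Vorbis.conv u₀) Vorbis.L.compute_bitreverse.entry (Vorbis.Spec.compute_bitreverse.spec others frames k))
    (_h_error : ∀ (others : List Obj) (frames : List (Nat × FrameLayout)), Calls Lay μ Vorbis.WayInv (Vorbis.conv u₀) Vorbis.L.error.entry (Vorbis.Spec.error.spec others frames)),
    ∀ (others : List Obj) (frames : List (Nat × FrameLayout)) (A : Arena) (k : Nat), Calls Lay μ Vorbis.WayInv (Vorbis.conv u₀) Vorbis.L.init_blocksize.entry (Vorbis.Spec.init_blocksize.spec others frames A k)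

end Vorbis.Spec.init_blocksize
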